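-- pv_equiv track=rewrite | github.com/MrQin877/ASKITTY | ASKITTY/ingest.py | chunk_with_pages
-- ===== SOURCE A (Python) =====
-- from typing import Optional, List, Tuple
--
-- def chunk_with_pages(full_text: str, page_spans: List[Tuple[int,int]], max_chars=3500, overlap=200):
--     """
--     page_spans = list of (start_index_in_full_text, page_number) sorted by start_index.
--     Yields: (chunk_text, pageStart)
--     """
--     out = []
--     i, n = 0, len(full_text)
--     step = max_chars - overlap
--     def page_for_index(idx: int) -> int:
--         # binary search not needed; linear is fine for doc-scale
--         current = 1
--         for start, pg in page_spans:
--             if idx >= start: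
--                 current = pg
--             else:
--                 break
--         return current
--
--     while i < n:
--         j = min(i + max_chars, n)
--         ck = full_text[i:j]
--         pageStart = page_for_index(i)
--         out.append((ck, pageStart))
--         i += step
--     return out
-- ===== SOURCE B (Python) =====
-- def chunk_with_pages(full_text, page_spans, max_chars=3500, overlap=200):
--     # One forward pass: chunk starts are increasing, so the page pointer only moves forward.
--     n = len(full_text)
--     if n == 0:
--         return []
--     out = []
--     p, cur = 0, 1
--     m = len(page_spans)
--     for i in range(0, n, max_chars - overlap):
--         while p < m and page_spans[p][0] <= i:
--             cur = page_spans[p][1]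
--             p += 1
--         out.append((full_text[i:min(i + max_chars, n)], cur))
--     return out
-- ===== Notes on version B (the rewrite author's own statement) =====
-- stated objective: alternative
-- what changed: A re-scans page_spans from the start for every chunk (page_for_index); B keeps a single forward pointer into page_spans that only advances as chunk starts increase, so each span is visited once across all chunks.
import Mathlib
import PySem

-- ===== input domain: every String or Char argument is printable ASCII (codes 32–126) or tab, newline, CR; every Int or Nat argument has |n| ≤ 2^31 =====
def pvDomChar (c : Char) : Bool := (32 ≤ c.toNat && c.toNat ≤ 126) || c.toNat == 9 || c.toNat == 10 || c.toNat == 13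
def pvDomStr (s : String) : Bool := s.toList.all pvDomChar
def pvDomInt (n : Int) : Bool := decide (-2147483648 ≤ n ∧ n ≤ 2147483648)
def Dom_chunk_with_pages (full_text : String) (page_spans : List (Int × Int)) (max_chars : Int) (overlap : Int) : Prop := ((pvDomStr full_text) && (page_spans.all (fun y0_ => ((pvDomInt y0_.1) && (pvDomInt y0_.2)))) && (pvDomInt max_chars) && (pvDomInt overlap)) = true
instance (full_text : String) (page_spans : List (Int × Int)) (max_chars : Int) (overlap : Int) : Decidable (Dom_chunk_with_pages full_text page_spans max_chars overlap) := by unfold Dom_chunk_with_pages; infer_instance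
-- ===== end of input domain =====

-- B removes A's per-chunk rescan of page_spans: a single forward pointer over page_spans
-- advances monotonically with the (increasing) chunk starts. Return values only; no mutation.

-- ===== PORT A =====
-- inner helper page_for_index: linear scan with `current = 1`, break at the first start > idx
def pvA_pageFor (idx : Int) : List (Int × Int) → Int → Int
  | [], current => current
  | (start, pg) :: rest, current =>
      if start ≤ idx then pvA_pageFor idx rest pg else current

-- the while-loop of A; fuel makes the recursion total (A diverges when step ≤ 0 and n > 0,
-- which Pre_ excludes; with step ≥ 1 the fuel n.toNat + 1 is never exhausted)
def pvA_loop (ft : String) (spans : List (Int × Int)) (max_chars step n : Int) :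
    Nat → Int → List (String × Int)
  | 0, _ => []
  | fuel + 1, i =>
      if i < n then
        let j := min (i + max_chars) n
        let ck := PySem.Str.slice ft (some i) (some j)
        (ck, pvA_pageFor i spans 1) :: pvA_loop ft spans max_chars step n fuel (i + step)
      else []

def chunk_with_pages (full_text : String) (page_spans : List (Int × Int)) (max_chars : Int) (overlap : Int) : List (String × Int) :=
  let n : Int := PySem.Str.len full_text
  let step := max_chars - overlap
  pvA_loop full_text page_spans max_chars step n (n.toNat + 1) 0

-- ===== PORT B =====
-- B's inner while: advance the pointer (here: the remaining suffix of page_spans) while its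
-- head's start ≤ i, updating the current page; returns (remaining suffix, current page)
def pvB_advance (i : Int) : List (Int × Int) → Int → (List (Int × Int)) × Int
  | [], cur => ([], cur)
  | (s, pg) :: rest, cur =>
      if s ≤ i then pvB_advance i rest pg else ((s, pg) :: rest, cur)

-- B's for-loop over range(0, n, step), carrying (remaining spans, current page)
def pvB_loop (ft : String) (max_chars n : Int) :
    List Int → List (Int × Int) → Int → List (String × Int)
  | [], _, _ => []
  | i :: is, rem, cur =>
      let st := pvB_advance i rem cur
      (PySem.Str.slice ft (some i) (some (min (i + max_chars) n)), st.2)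
        :: pvB_loop ft max_chars n is st.1 st.2

def chunk_with_pages_alt (full_text : String) (page_spans : List (Int × Int)) (max_chars : Int) (overlap : Int) : List (String × Int) :=
  let n : Int := PySem.Str.len full_text
  if n = 0 then []
  else pvB_loop full_text max_chars n (PySem.List.pyRange 0 n (max_chars - overlap)) page_spans 1

-- ===== PRECONDITION & SPEC =====
-- Pre_ excludes only inputs on which A never returns: with nonempty text and step = max_chars - overlap ≤ 0
-- the while loop never reaches n (A diverges; B raises ValueError for step = 0 / returns nothing claimed).
def Pre_chunk_with_pages (full_text : String) (page_spans : List (Int × Int)) (max_chars : Int) (overlap : Int) : Prop :=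
  full_text = "" ∨ 1 ≤ max_chars - overlap

instance (full_text : String) (page_spans : List (Int × Int)) (max_chars : Int) (overlap : Int) : Decidable (Pre_chunk_with_pages full_text page_spans max_chars overlap) := by
  unfold Pre_chunk_with_pages; infer_instance

def pvWitness_chunk_with_pages : String × (List (Int × Int)) × Int × Int :=
  ("abcdefgh", [(0, 1), (3, 2), (6, 3)], 4, 1)

def Spec_chunk_with_pages (full_text : String) (page_spans : List (Int × Int)) (max_chars : Int) (overlap : Int) (out : List (String × Int)) : Prop := out = chunk_with_pages_alt full_text page_spans max_chars overlap
instance (full_text : String) (page_spans : List (Int × Int)) (max_chars : Int) (overlap : Int) (out : List (String × Int)) : Decidable (Spec_chunk_with_pages full_text page_spans max_chars overlap out) := by unfold Spec_chunk_with_pages; infer_instance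

-- ===== CLAIM (what is proved, stated in full; the proofs are below) =====
def Claim_equal_chunk_with_pages : Prop := ∀ (full_text : String) (page_spans : List (Int × Int)) (max_chars : Int) (overlap : Int), Dom_chunk_with_pages full_text page_spans max_chars overlap → Pre_chunk_with_pages full_text page_spans max_chars overlap → Spec_chunk_with_pages full_text page_spans max_chars overlap (chunk_with_pages full_text page_spans max_chars overlap)

-- ===== LEMMAS AND PROOFS =====

-- A's page_for_index equals the page component of B's pointer advance (same scan, same state)
theorem pageFor_eq_advance (i : Int) (l : List (Int × Int)) (cur : Int) :
    pvA_pageFor i l cur = (pvB_advance i l cur).2 := by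
  induction l generalizing cur with
  | nil => rfl
  | cons hd tl ih =>
      obtain ⟨s, pg⟩ := hd
      simp only [pvA_pageFor, pvB_advance]
      split <;> simp [ih]

-- advancing to i then further to i' ≥ i is advancing straight to i'
theorem advance_trans (l : List (Int × Int)) (cur i i' : Int) (h : i ≤ i') :
    pvB_advance i' (pvB_advance i l cur).1 (pvB_advance i l cur).2 = pvB_advance i' l cur := by
  induction l generalizing cur with
  | nil => rfl
  | cons hd tl ih =>
      obtain ⟨s, pg⟩ := hd
      simp only [pvB_advance]
      by_cases hs : s ≤ i
      · have hs' : s ≤ i' := le_trans hs h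
        simp [hs, hs', ih]
      · simp [pvB_advance, hs]

-- pyRange with positive step, as a cons (induction form)
theorem pyRange_pos_cons (a b s : Int) (hs : 0 < s) (hab : a < b) :
    PySem.List.pyRange a b s = a :: PySem.List.pyRange (a + s) b s := by
  rw [PySem.List.pyRange_of_pos _ _ hs, PySem.List.pyRange_of_pos _ _ hs]
  have hdiv : (b - a + s - 1) / s = (b - a - 1) / s + 1 := by
    rw [show b - a + s - 1 = (b - a - 1) + 1 * s by ring]
    exact Int.add_mul_ediv_right _ _ (ne_of_gt hs)
  have hnn : 0 ≤ (b - a - 1) / s := Int.ediv_nonneg (by omega) (by omega)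
  by_cases h2 : a + s < b
  · have hc2 : b - (a + s) + s - 1 = b - a - 1 := by ring
    rw [if_pos hab, if_pos h2, hc2, hdiv]
    rw [show ((b - a - 1) / s + 1).toNat = ((b - a - 1) / s).toNat + 1 by omega]
    rw [List.range_succ_eq_map, List.map_cons, List.map_map]
    congr 1
    · simp
    · apply List.map_congr_left
      intro k _
      simp only [Function.comp_apply]
      push_cast
      ring
  · have hz : (b - a - 1) / s = 0 := by
      apply Int.ediv_eq_zero_of_lt (by omega) (by omega)
    rw [if_pos hab, if_neg h2, hdiv, hz]
    simp

theorem pyRange_pos_nil (a b s : Int) (hs : 0 < s) (hab : ¬ a < b) :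
    PySem.List.pyRange a b s = [] := by
  rw [PySem.List.pyRange_of_pos _ _ hs, if_neg hab]
  simp

-- main loop simulation: A's fuelled while-loop equals B's fold over range(i, n, step),
-- provided B's pointer state (rem, cur) agrees with a fresh scan at every index ≥ i
theorem loop_eq (ft : String) (spans : List (Int × Int)) (max_chars step n : Int)
    (hs : 1 ≤ step) :
    ∀ (fuel : Nat) (i : Int) (rem : List (Int × Int)) (cur : Int),
      (n - i).toNat < fuel →
      (∀ i', i ≤ i' → pvB_advance i' rem cur = pvB_advance i' spans 1) →
      pvA_loop ft spans max_chars step n fuel i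
        = pvB_loop ft max_chars n (PySem.List.pyRange i n step) rem cur := by
  intro fuel
  induction fuel with
  | zero => intro i rem cur hf _; omega
  | succ fuel ih =>
      intro i rem cur hf hinv
      by_cases hin : i < n
      · rw [pyRange_pos_cons i n step (by omega) hin]
        simp only [pvA_loop, pvB_loop, if_pos hin]
        have hst : pvB_advance i rem cur = pvB_advance i spans 1 := hinv i le_rfl
        congr 1
        · rw [pageFor_eq_advance, ← hst]
        · apply ih
          · omega
          · intro i' hi'
            rw [advance_trans rem cur i i' (by omega)]
            exact hinv i' (by omega)
      · rw [pyRange_pos_nil i n step (by omega) hin]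
        simp [pvA_loop, pvB_loop, hin]

-- ===== VERDICT (by name: the statement is the Claim_ definition above) =====
theorem chunk_with_pages_spec : Claim_equal_chunk_with_pages := by
  intro ft spans max_chars overlap _hdom hpre
  unfold Spec_chunk_with_pages chunk_with_pages chunk_with_pages_alt
  rcases hpre with hempty | hstep
  · subst hempty
    rfl
  · by_cases hn : PySem.Str.len ft = 0
    · simp only [hn]
      have : pvA_loop ft spans max_chars (max_chars - overlap) 0 (Int.toNat 0 + 1) 0 = [] := by
        simp [pvA_loop]
      simpa using this
    · rw [if_neg hn]
      apply loop_eq ft spans max_chars (max_chars - overlap) (PySem.Str.len ft) hstep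
      · have : 0 ≤ PySem.Str.len ft := by
          simp [PySem.Str.len]
        omega
      · intro i' _; rfl
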